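-- pv_equiv track=rewrite | github.com/miliar/Code_Jam_Webscraper | Solutions_python/Problem_118/624.py | palindromes
-- ===== SOURCE A (Python) =====
-- def palindromes(l, inside=False):
--     for i in ('0','1','2') if inside else ('1','2'):
--         if l == 1:
--             yield i
--         elif l == 2:
--             yield i + i
--         else:
--             for j in palindromes(l-2, True):
--                 yield ''.join([i,j,i])
-- ===== SOURCE B (Python) =====
-- def palindromes(l, inside=False):
--     h = (l + 1) // 2
--     prefixes = ['']
--     for k in range(h):
--         digits = ('0', '1', '2') if inside or k > 0 else ('1', '2')
--         prefixes = [p + d for p in prefixes for d in digits]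
--     for p in prefixes:
--         yield p + p[:l // 2][::-1]
-- ===== Notes on version B (the rewrite author's own statement) =====
-- stated objective: alternative
-- what changed: Replaces the outer-to-inner recursive generator by an iterative enumerate-half-then-mirror scheme: build all first-half digit strings with one fold (first digit from '12' or '012', later digits from '012'), then emit p + reversed(p[:l//2]) for each prefix, preserving A's yield order.
import Mathlib
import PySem

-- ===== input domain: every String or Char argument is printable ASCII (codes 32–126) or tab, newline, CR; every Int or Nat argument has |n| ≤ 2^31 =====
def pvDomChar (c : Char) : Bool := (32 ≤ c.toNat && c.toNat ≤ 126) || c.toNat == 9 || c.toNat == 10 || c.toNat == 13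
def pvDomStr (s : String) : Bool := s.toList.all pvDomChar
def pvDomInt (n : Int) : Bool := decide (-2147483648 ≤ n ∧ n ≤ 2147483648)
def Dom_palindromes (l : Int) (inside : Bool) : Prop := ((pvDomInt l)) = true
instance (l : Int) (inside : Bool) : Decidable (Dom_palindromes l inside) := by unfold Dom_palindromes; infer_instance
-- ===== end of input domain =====

-- B replaces A's outer-to-inner recursion by an iterative enumerate-half-then-mirror scheme
-- (each palindrome is assembled once from its half-prefix instead of layer by layer).
-- Both Pythons are generators; equivalence is about the list of yielded values.

-- ===== PORT A =====
-- A recurses on l-2; the recursion is fueled by l.toNat, which suffices for every l ≥ 1.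
-- For l ≤ 0 the Python recurses without reaching a base case (RecursionError) — excluded by Pre_.
def palindromesAux : Nat → Int → Bool → List String
  | 0, _, _ => []
  | fuel+1, l, inside =>
    (if inside then ["0", "1", "2"] else ["1", "2"]).flatMap (fun i =>
      if l = 1 then [i]
      else if l = 2 then [i ++ i]
      else (palindromesAux fuel (l - 2) true).map (fun j => PySem.Str.join "" [i, j, i]))

def palindromes (l : Int) (inside : Bool) : List String := palindromesAux l.toNat l inside

-- ===== PORT B =====
def palindromes_alt (l : Int) (inside : Bool) : List String :=
  let h := PySem.Int.floordiv (l + 1) 2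
  let prefixes := (PySem.List.pyRange 0 h 1).foldl
    (fun prefixes k =>
      prefixes.flatMap (fun p =>
        (if inside || decide (0 < k) then ["0", "1", "2"] else ["1", "2"]).map (fun d => p ++ d)))
    [""]
  prefixes.map (fun p =>
    p ++ (PySem.Str.slice? (PySem.Str.slice p none (some (PySem.Int.floordiv l 2))) none none (-1)).getD "")

-- ===== PRECONDITION & SPEC =====
-- Pre_ excludes exactly l ≤ 0, where the Python A recurses forever (RecursionError, no value).
def Pre_palindromes (l : Int) (inside : Bool) : Prop := 1 ≤ l
instance (l : Int) (inside : Bool) : Decidable (Pre_palindromes l inside) := by unfold Pre_palindromes; infer_instance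
def pvWitness_palindromes : Int × Bool := (3, false)

def Spec_palindromes (l : Int) (inside : Bool) (out : List String) : Prop := out = palindromes_alt l inside
instance (l : Int) (inside : Bool) (out : List String) : Decidable (Spec_palindromes l inside out) := by unfold Spec_palindromes; infer_instance

-- ===== CLAIM (what is proved, stated in full; the proofs are below) =====
def Claim_equal_palindromes : Prop := ∀ (l : Int) (inside : Bool), Dom_palindromes l inside → Pre_palindromes l inside → Spec_palindromes l inside (palindromes l inside)

-- ===== LEMMAS AND PROOFS =====

-- digit alternatives, and B's half-prefix extension step / its iteration
def digs (b : Bool) : List String := if b then ["0", "1", "2"] else ["1", "2"]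

def extStep (xs : List String) : List String :=
  xs.flatMap (fun p => ["0", "1", "2"].map (fun d => p ++ d))

def exts : Nat → List String → List String
  | 0, xs => xs
  | n+1, xs => exts n (extStep xs)

def mirror (l : Int) (p : String) : String :=
  p ++ (PySem.Str.slice? (PySem.Str.slice p none (some (PySem.Int.floordiv l 2))) none none (-1)).getD ""

lemma exts_nil (n : Nat) : exts n [] = [] := by
  induction n with
  | zero => rfl
  | succ n ih => simpa [exts, extStep] using ih

lemma exts_append (n : Nat) : ∀ xs ys, exts n (xs ++ ys) = exts n xs ++ exts n ys := by
  induction n with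
  | zero => intro xs ys; rfl
  | succ n ih => intro xs ys; simp only [exts, extStep, List.flatMap_append, ih]

lemma exts_map_prepend (n : Nat) : ∀ (x : String) xs,
    exts n (xs.map (fun s => x ++ s)) = (exts n xs).map (fun s => x ++ s) := by
  induction n with
  | zero => intro x xs; rfl
  | succ n ih =>
    intro x xs
    have hstep : extStep (xs.map (fun s => x ++ s)) = (extStep xs).map (fun s => x ++ s) := by
      simp [extStep, List.flatMap_map, List.map_flatMap, String.append_assoc]
    simp only [exts, hstep, ih]

lemma exts_flatMap (n : Nat) : ∀ xs : List String,
    exts n xs = xs.flatMap (fun x => (exts n [""]).map (fun s => x ++ s)) := by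
  intro xs
  induction xs with
  | nil => simpa using exts_nil n
  | cons x xs ih =>
    have h1 : exts n (x :: xs) = exts n [x] ++ exts n xs := by
      simpa using exts_append n [x] xs
    have h2 : exts n [x] = (exts n [""]).map (fun s => x ++ s) := by
      have : ([x] : List String) = ([""] : List String).map (fun s => x ++ s) := by simp
      rw [this, exts_map_prepend]
    simp [h1, h2, ih]

lemma exts_one_succ (m : Nat) : exts (m + 1) [""] = exts m ["0", "1", "2"] := by
  have : extStep [""] = ["0", "1", "2"] := by simp [extStep]
  simp only [exts, this]

-- B's foldl over the strictly positive tail of range(h) is the all-digits extension iteration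
lemma foldl_extStep (inside : Bool) : ∀ (ks : List Int), (∀ k ∈ ks, 0 < k) → ∀ xs : List String,
    ks.foldl (fun prefixes k =>
      prefixes.flatMap (fun p =>
        (if inside || decide (0 < k) then ["0", "1", "2"] else ["1", "2"]).map (fun d => p ++ d)))
      xs = exts ks.length xs := by
  intro ks
  induction ks with
  | nil => intro _ xs; rfl
  | cons k ks ih =>
    intro hk xs
    have hkpos : 0 < k := hk k (by simp)
    have hcond : (inside || decide (0 < k)) = true := by simp [hkpos]
    simp only [List.foldl_cons, hcond, List.length_cons]
    rw [ih (fun k hm => hk k (by simp [hm]))]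
    simp [exts, extStep]

-- B in closed shape: half-prefixes then mirror
lemma alt_eq_exts (l : Int) (inside : Bool) (m : Nat)
    (hm : PySem.Int.floordiv (l + 1) 2 = ((m + 1 : Nat) : Int)) :
    palindromes_alt l inside = (exts m (digs inside)).map (mirror l) := by
  simp only [palindromes_alt, hm]
  rw [PySem.List.pyRange_zero_natCast (m + 1), List.range_succ_eq_map]
  simp only [List.map_cons, List.foldl_cons, List.map_map]
  have h0 : (inside || decide ((0 : Int) < ((0 : Nat) : Int))) = inside := by simp
  rw [h0]
  have hpos : ∀ k ∈ (List.range m).map (fun i => (((i + 1 : Nat) : Int))), 0 < k := by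
    intro k hk
    simp only [List.mem_map] at hk
    obtain ⟨i, _, rfl⟩ := hk
    exact_mod_cast Nat.succ_pos i
  rw [show ((List.range m).map (Nat.cast ∘ fun i => i + 1) : List Int)
        = (List.range m).map (fun i => (((i + 1 : Nat) : Int))) from by simp [Function.comp],
      foldl_extStep inside _ hpos]
  simp only [List.length_map, List.length_range]
  have hstart : List.flatMap
      (fun p => List.map (fun d => p ++ d) (if inside = true then ["0", "1", "2"] else ["1", "2"]))
      [""] = digs inside := by
    cases inside <;> simp [digs]
  rw [hstart]
  rfl

lemma mirror_toList (l : Int) (hl : 0 ≤ PySem.Int.floordiv l 2) (p : String) :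
    (mirror l p).toList = p.toList ++ (p.toList.take (PySem.Int.floordiv l 2).toNat).reverse := by
  rw [mirror, PySem.Str.slice?_none_none_neg_one, Option.getD_some, String.toList_append,
    String.toList_ofList, PySem.Str.toList_slice, PySem.Chars.slice_eq_listSlice,
    PySem.List.slice_to _ hl]

-- the mirror of a one-digit extension is the digit wrapped around the shorter mirror
lemma mirror_step (l : Int) (hl : 3 ≤ l) (i : String) (c : Char) (hc : i.toList = [c]) (s : String) :
    mirror l (i ++ s) = PySem.Str.join "" [i, mirror (l - 2) s, i] := by
  have h2 : (1 : Int) ≤ PySem.Int.floordiv l 2 := by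
    rw [PySem.Int.floordiv_eq_ediv_of_pos (by omega)]; omega
  have h2' : (0 : Int) ≤ PySem.Int.floordiv (l - 2) 2 := by
    rw [PySem.Int.floordiv_eq_ediv_of_pos (by omega)]; omega
  have hsub : PySem.Int.floordiv l 2 = PySem.Int.floordiv (l - 2) 2 + 1 := by
    rw [PySem.Int.floordiv_eq_ediv_of_pos (by omega), PySem.Int.floordiv_eq_ediv_of_pos (by omega)]
    omega
  have htn : (PySem.Int.floordiv l 2).toNat = (PySem.Int.floordiv (l - 2) 2).toNat + 1 := by
    omega
  have hA := mirror_toList l (by omega) (i ++ s)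
  have hB := mirror_toList (l - 2) h2' s
  apply String.toList_inj.mp
  simp [PySem.Str.toList_join, PySem.Chars.join, List.intercalate, hA, hB, hc, htn,
    String.toList_append]
  rw [show (l / 2).toNat = ((l - 2) / 2).toNat + 1 from by omega]
  simp

lemma mirror_two (i : String) (c : Char) (hc : i.toList = [c]) : mirror 2 i = i ++ i := by
  apply String.toList_inj.mp
  rw [mirror_toList 2 (by decide)]
  simp [hc, show ((PySem.Int.floordiv 2 2).toNat) = 1 from by decide]

lemma mirror_one (i : String) : mirror 1 i = i := by
  apply String.toList_inj.mp
  rw [mirror_toList 1 (by decide)]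
  simp [show ((PySem.Int.floordiv 1 2).toNat) = 0 from by decide]

lemma main_eq : ∀ (fuel : Nat) (l : Int) (inside : Bool), 1 ≤ l → l.toNat ≤ fuel →
    palindromesAux fuel l inside = palindromes_alt l inside := by
  intro fuel
  induction fuel with
  | zero => intro l inside hl hf; omega
  | succ fuel ih =>
    intro l inside hl hf
    have hdigs : (if inside then (["0", "1", "2"] : List String) else ["1", "2"]) = digs inside := rfl
    rcases lt_or_ge l 3 with hl3 | hl3
    · -- l = 1 or l = 2
      interval_cases l
      · -- l = 1
        rw [alt_eq_exts 1 inside 0 (by decide)]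
        simp only [palindromesAux, hdigs]
        cases inside <;> simp [digs, exts, List.flatMap_cons, List.flatMap_nil,
          mirror_one]
      · -- l = 2
        rw [alt_eq_exts 2 inside 0 (by decide)]
        simp only [palindromesAux, hdigs, if_neg (show (2 : Int) ≠ 1 from by decide)]
        cases inside <;> simp [digs, exts, List.flatMap_cons, List.flatMap_nil,
          mirror_two "0" '0' rfl, mirror_two "1" '1' rfl, mirror_two "2" '2' rfl]
    · -- l ≥ 3
      obtain ⟨m', hm⟩ : ∃ m' : Nat, PySem.Int.floordiv (l + 1) 2 = ((m' + 1 + 1 : Nat) : Int) := by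
        have h2 : (2 : Int) ≤ PySem.Int.floordiv (l + 1) 2 := by
          rw [PySem.Int.floordiv_eq_ediv_of_pos (by omega)]; omega
        refine ⟨(PySem.Int.floordiv (l + 1) 2).toNat - 2, ?_⟩
        omega
      have hm' : PySem.Int.floordiv (l - 2 + 1) 2 = ((m' + 1 : Nat) : Int) := by
        rw [PySem.Int.floordiv_eq_ediv_of_pos (by omega)]
        rw [PySem.Int.floordiv_eq_ediv_of_pos (by omega)] at hm
        omega
      have hrec : palindromesAux fuel (l - 2) true = palindromes_alt (l - 2) true :=
        ih (l - 2) true (by omega) (by omega)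
      rw [alt_eq_exts (l - 2) true m' hm'] at hrec
      rw [alt_eq_exts l inside (m' + 1) hm]
      -- unfold one step of A
      simp only [palindromesAux, hdigs,
        if_neg (show l ≠ 1 from by omega), if_neg (show l ≠ 2 from by omega), hrec]
      -- B's prefixes factor through the first digit
      rw [exts_flatMap (m' + 1) (digs inside), exts_one_succ m',
        show (["0", "1", "2"] : List String) = digs true from rfl]
      set X := exts m' (digs true) with hX
      rw [List.map_flatMap]
      have key : ∀ (i : String) (c : Char), i.toList = [c] →
          List.map ((fun j => PySem.Str.join "" [i, j, i]) ∘ mirror (l - 2)) X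
            = List.map (mirror l ∘ fun s => i ++ s) X := by
        intro i c hc
        refine List.map_congr_left (fun s _ => ?_)
        simp only [Function.comp]
        exact (mirror_step l hl3 i c hc s).symm
      cases inside <;>
        simp [digs, List.flatMap_cons, List.flatMap_nil,
          key "0" '0' rfl, key "1" '1' rfl, key "2" '2' rfl]

-- ===== VERDICT (by name: the statement is the Claim_ definition above) =====
theorem palindromes_spec : Claim_equal_palindromes := by
  intro l inside _ hpre
  unfold Spec_palindromes palindromes
  exact main_eq l.toNat l inside hpre le_rfl
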